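-- pv_equiv track=rewrite | github.com/Aldric-L/Aligning-the-Unseen-in-Attributed-Graphs | framework/proto.py | _get_neighboring_keys
-- ===== SOURCE A (Python) =====
-- from typing import Optional, Dict, Tuple
-- from typing import Optional, Dict, Tuple, List
--
-- def _get_neighboring_keys(key: Tuple[int, ...]) -> list:
--     """Get neighboring grid keys for interpolation"""
--     neighbors = []
--     if len(key) == 1:
--         for dx in [-1, 0, 1]:
--             neighbors.append((key[0] + dx,))
--     elif len(key) == 2:
--         for dx in [-1, 0, 1]:
--             for dy in [-1, 0, 1]:
--                 neighbors.append((key[0] + dx, key[1] + dy))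
--     else:  # General case for higher dimensions
--         import itertools
--         offsets = list(itertools.product([-1, 0, 1], repeat=len(key)))
--         for offset in offsets:
--             neighbors.append(tuple(k + o for k, o in zip(key, offset)))
--     return neighbors
-- ===== SOURCE B (Python) =====
-- def _get_neighboring_keys(key):
--     """Get neighboring grid keys for interpolation"""
--     if not key:
--         return [()]
--     partials = _get_neighboring_keys(key[:-1])
--     last = key[-1]
--     return [p + (last + dx,) for p in partials for dx in (-1, 0, 1)]
-- ===== Notes on version B (the rewrite author's own statement) =====
-- stated objective: simpler
-- what changed: Replaces the len==1/len==2 special cases plus an itertools.product general case by one uniform recursion that extends the neighbor tuples one coordinate at a time (last coordinate varying fastest).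
import Mathlib
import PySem

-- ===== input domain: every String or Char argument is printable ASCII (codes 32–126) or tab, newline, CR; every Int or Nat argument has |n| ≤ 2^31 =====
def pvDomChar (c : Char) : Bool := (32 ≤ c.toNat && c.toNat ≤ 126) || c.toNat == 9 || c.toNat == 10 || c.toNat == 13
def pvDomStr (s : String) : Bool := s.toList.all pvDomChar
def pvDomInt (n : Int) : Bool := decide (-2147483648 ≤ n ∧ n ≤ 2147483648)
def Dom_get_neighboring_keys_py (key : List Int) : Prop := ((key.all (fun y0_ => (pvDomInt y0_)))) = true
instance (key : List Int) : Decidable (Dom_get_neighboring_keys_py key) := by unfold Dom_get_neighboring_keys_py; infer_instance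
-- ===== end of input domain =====

-- B replaces A's len==1/len==2 special cases and itertools.product general case by one
-- uniform recursion extending the neighbor tuples a coordinate at a time (objective: simpler).

-- ===== PORT A =====
-- itertools.product([-1,0,1], repeat=n), in itertools order (first factor outermost)
def pvProdRep : Nat → List (List Int)
  | 0 => [[]]
  | n + 1 => ([-1, 0, 1] : List Int).flatMap (fun d => (pvProdRep n).map (fun t => d :: t))

def get_neighboring_keys_py (key : List Int) : List (List Int) :=
  if key.length == 1 then
    ([-1, 0, 1] : List Int).foldl
      (fun nb dx => nb ++ [[PySem.List.pyGetD key 0 0 + dx]]) []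
  else if key.length == 2 then
    ([-1, 0, 1] : List Int).foldl
      (fun nb dx => ([-1, 0, 1] : List Int).foldl
        (fun nb dy => nb ++ [[PySem.List.pyGetD key 0 0 + dx, PySem.List.pyGetD key 1 0 + dy]]) nb) []
  else
    (pvProdRep key.length).foldl
      (fun nb off => nb ++ [List.zipWith (· + ·) key off]) []

-- ===== PORT B =====
def get_neighboring_keys_py_alt (key : List Int) : List (List Int) :=
  if h : key = [] then [[]]
  else
    let partials := get_neighboring_keys_py_alt key.dropLast
    let last := key.getLast h
    partials.flatMap (fun p => ([-1, 0, 1] : List Int).map (fun dx => p ++ [last + dx]))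
termination_by key.length
decreasing_by
  simpa using Nat.sub_lt (List.length_pos_of_ne_nil h) Nat.one_pos

-- ===== PRECONDITION & SPEC =====
def Spec_get_neighboring_keys_py (key : List Int) (out : List (List Int)) : Prop := out = get_neighboring_keys_py_alt key
instance (key : List Int) (out : List (List Int)) : Decidable (Spec_get_neighboring_keys_py key out) := by unfold Spec_get_neighboring_keys_py; infer_instance

-- ===== CLAIM (what is proved, stated in full; the proofs are below) =====
def Claim_equal_get_neighboring_keys_py : Prop := ∀ (key : List Int), Dom_get_neighboring_keys_py key → Spec_get_neighboring_keys_py key (get_neighboring_keys_py key)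

-- ===== LEMMAS AND PROOFS =====

-- canonical head-recursive enumeration, mediating between the two ports
def pvNbC : List Int → List (List Int)
  | [] => [[]]
  | k :: rest => ([-1, 0, 1] : List Int).flatMap (fun d => (pvNbC rest).map (fun t => (k + d) :: t))

theorem pvNbC_snoc (xs : List Int) (x : Int) :
    pvNbC (xs ++ [x]) =
      (pvNbC xs).flatMap (fun p => ([-1, 0, 1] : List Int).map (fun dx => p ++ [x + dx])) := by
  induction xs with
  | nil => simp [pvNbC]
  | cons k xs ih =>
      simp only [List.cons_append, pvNbC, ih, List.map_flatMap, List.map_map]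
      simp [List.flatMap_map, Function.comp]

theorem pvAlt_eq_nbC (key : List Int) : get_neighboring_keys_py_alt key = pvNbC key := by
  induction key using List.reverseRecOn with
  | nil => simp [get_neighboring_keys_py_alt, pvNbC]
  | append_singleton xs x ih =>
      rw [get_neighboring_keys_py_alt]
      simp [ih, pvNbC_snoc]

theorem pvFold_append (l : List (List Int)) (f : List Int → List Int) (acc : List (List Int)) :
    l.foldl (fun nb off => nb ++ [f off]) acc = acc ++ l.map f := by
  induction l generalizing acc with
  | nil => simp
  | cons a l ih => simp [List.foldl_cons, ih]

theorem pvGen_eq_nbC (key : List Int) :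
    (pvProdRep key.length).map (fun off => List.zipWith (· + ·) key off) = pvNbC key := by
  induction key with
  | nil => simp [pvProdRep, pvNbC]
  | cons k rest ih =>
      simp only [List.length_cons, pvProdRep, pvNbC, List.map_flatMap, List.map_map]
      refine List.flatMap_congr ?_
      intro d _
      rw [← ih, List.map_map]
      rfl

theorem pvA_eq_nbC (key : List Int) : get_neighboring_keys_py key = pvNbC key := by
  match key with
  | [] => simp [get_neighboring_keys_py, pvProdRep, pvNbC]
  | [a] =>
      simp [get_neighboring_keys_py, pvNbC, PySem.List.pyGetD]
  | [a, b] =>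
      simp [get_neighboring_keys_py, pvNbC, PySem.List.pyGetD]
  | a :: b :: c :: rest =>
      rw [get_neighboring_keys_py]
      rw [if_neg (by simp), if_neg (by simp)]
      rw [pvFold_append, List.nil_append, pvGen_eq_nbC]

-- ===== VERDICT (by name: the statement is the Claim_ definition above) =====
theorem get_neighboring_keys_py_spec : Claim_equal_get_neighboring_keys_py := by
  intro key _
  unfold Spec_get_neighboring_keys_py
  rw [pvA_eq_nbC, pvAlt_eq_nbC]
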